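-- pv_equiv track=rewrite | github.com/tkzzzzzz6/Algorithm_beginner_learning_notes | niuke_race/2024/小白103/1.py | find_min_polygon
-- ===== SOURCE A (Python) =====
-- from collections import Counter
--
-- def find_min_polygon(sticks):
--     count = Counter(sticks)
--     min_perimeter = float('inf')
--     found = False
--
--     for length, num in count.items():
--         for sides in range(3, num + 1):  # 从3边开始尝试，直到当前长度木棍的数量
--             if num >= sides:
--                 perimeter = sides * length
--                 if perimeter < min_perimeter:
--                     min_perimeter = perimeter
--                     found = True
--
--     if found:
--         return f"yes\n{min_perimeter}"
--     else:
--         return "no"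
-- ===== SOURCE B (Python) =====
-- def find_min_polygon(sticks):
--     # Single streaming pass: when a length reaches its c-th copy (c >= 3),
--     # a regular c-gon of that length becomes possible; track the smallest
--     # perimeter seen.
--     counts = {}
--     best = None
--     for x in sticks:
--         c = counts.get(x, 0) + 1
--         counts[x] = c
--         if c >= 3:
--             p = c * x
--             if best is None or p < best:
--                 best = p
--     return f"yes\n{best}" if best is not None else "no"
-- ===== Notes on version B (the rewrite author's own statement) =====
-- stated objective: alternative
-- what changed: Replaces Counter plus a nested loop over candidate side counts by a single streaming pass that updates a count dict and the running best perimeter as each stick arrives, so there is no second phase and no inner loop.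
import Mathlib
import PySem

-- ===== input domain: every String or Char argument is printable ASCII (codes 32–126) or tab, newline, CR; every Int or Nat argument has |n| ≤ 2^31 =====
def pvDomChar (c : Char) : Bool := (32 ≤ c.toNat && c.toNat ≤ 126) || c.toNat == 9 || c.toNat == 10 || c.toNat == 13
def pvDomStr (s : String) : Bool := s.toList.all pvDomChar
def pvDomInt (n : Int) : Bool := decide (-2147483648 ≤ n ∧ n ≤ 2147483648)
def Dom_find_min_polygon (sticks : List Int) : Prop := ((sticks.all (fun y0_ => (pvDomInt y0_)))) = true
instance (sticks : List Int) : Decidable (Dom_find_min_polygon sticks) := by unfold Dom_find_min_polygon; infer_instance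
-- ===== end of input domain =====

-- B replaces A's Counter-then-nested-loop by a single streaming pass that updates a
-- count dict and the running best perimeter as each stick arrives; objective: alternative.

-- ===== PORT A =====
-- min_perimeter = float('inf') and the 'found' flag are represented together as an
-- Option Int: none = (inf, not found), some m = (m, found); 'perimeter < inf' is true.
def find_min_polygon (sticks : List Int) : String :=
  let count := PySem.Dict.counter sticks
  let minp := count.items.foldl (fun (m : Option Int) lv =>
      (PySem.List.pyRange 3 (lv.2 + 1) 1).foldl (fun (m : Option Int) sides =>
        if lv.2 ≥ sides then
          match m with
          | none => some (sides * lv.1)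
          | some q => if sides * lv.1 < q then some (sides * lv.1) else some q
        else m) m) none
  match minp with
  | some m => "yes\n" ++ PySem.Int.toStr m
  | none => "no"

-- ===== PORT B =====
-- best = None is Option Int: none = None, some b = b.
def find_min_polygon_alt (sticks : List Int) : String :=
  let st := sticks.foldl (fun (st : PySem.Dict Int Int × Option Int) x =>
      let c := st.1.getD x 0 + 1
      let counts := st.1.insert x c
      if c ≥ 3 then
        let p := c * x
        match st.2 with
        | none => (counts, some p)
        | some b => if p < b then (counts, some p) else (counts, some b)
      else (counts, st.2)) (PySem.Dict.empty, none)
  match st.2 with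
  | some b => "yes\n" ++ PySem.Int.toStr b
  | none => "no"

-- ===== PRECONDITION & SPEC =====
def Spec_find_min_polygon (sticks : List Int) (out : String) : Prop := out = find_min_polygon_alt sticks
instance (sticks : List Int) (out : String) : Decidable (Spec_find_min_polygon sticks out) := by unfold Spec_find_min_polygon; infer_instance

-- ===== CLAIM (what is proved, stated in full; the proofs are below) =====
def Claim_equal_find_min_polygon : Prop := ∀ (sticks : List Int), Dom_find_min_polygon sticks → Spec_find_min_polygon sticks (find_min_polygon sticks)

-- ===== LEMMAS AND PROOFS =====

-- the running minimum both programs maintain ('inf'/None as none)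
def minOpt (m : Option Int) (v : Int) : Option Int :=
  match m with
  | none => some v
  | some q => if v < q then some v else some q

theorem minOpt_leftComm (m : Option Int) (a b : Int) :
    minOpt (minOpt m a) b = minOpt (minOpt m b) a := by
  cases m <;> simp only [minOpt] <;> split_ifs <;>
    (try simp only [minOpt]) <;> (try split_ifs) <;>
    (try simp only [Option.some.injEq]) <;> omega

-- A's candidate list: for each distinct length k, the perimeters s*k for 3 ≤ s ≤ count k
def ALcands (sticks : List Int) : List Int :=
  (PySem.Set.ofList sticks).flatMap
    (fun k => (PySem.List.pyRange 3 ((sticks.count k : Int) + 1) 1).map (fun s => s * k))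

-- B's candidate list, in stream order, starting from counts d
def BLcands (d : PySem.Dict Int Int) : List Int → List Int
  | [] => []
  | x :: xs =>
      (if d.getD x 0 + 1 ≥ 3 then [(d.getD x 0 + 1) * x] else [])
        ++ BLcands (d.insert x (d.getD x 0 + 1)) xs

-- A's inner loop is a minOpt fold over the range (the guard num ≥ sides always holds there)
theorem inner_congr (l num : Int) (m : Option Int) :
    (PySem.List.pyRange 3 (num + 1) 1).foldl (fun (m : Option Int) sides =>
        if num ≥ sides then
          match m with
          | none => some (sides * l)
          | some q => if sides * l < q then some (sides * l) else some q
        else m) m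
    = ((PySem.List.pyRange 3 (num + 1) 1).map (fun s => s * l)).foldl minOpt m := by
  rw [List.foldl_map]
  apply PySem.List.foldl_congr_mem
  intro acc s hs
  have h := (PySem.List.mem_pyRange_one.mp hs).2
  have hns : num ≥ s := by omega
  simp only [hns, if_true]
  rfl

-- A's outer fold is a minOpt fold over the flatMap of per-length candidate lists
theorem outer_eq (items : List (Int × Int)) (m : Option Int) :
    items.foldl (fun (m : Option Int) lv =>
        (PySem.List.pyRange 3 (lv.2 + 1) 1).foldl (fun (m : Option Int) sides =>
          if lv.2 ≥ sides then
            match m with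
            | none => some (sides * lv.1)
            | some q => if sides * lv.1 < q then some (sides * lv.1) else some q
          else m) m) m
    = (items.flatMap (fun lv => (PySem.List.pyRange 3 (lv.2 + 1) 1).map (fun s => s * lv.1))).foldl
        minOpt m := by
  induction items generalizing m with
  | nil => rfl
  | cons lv rest ih =>
      simp only [List.foldl_cons, List.flatMap_cons, List.foldl_append]
      rw [inner_congr, ih]

-- B's fold computes the minOpt fold over BLcands
theorem B_fold (sticks : List Int) (d : PySem.Dict Int Int) (m : Option Int) :
    (sticks.foldl (fun (st : PySem.Dict Int Int × Option Int) x =>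
      let c := st.1.getD x 0 + 1
      let counts := st.1.insert x c
      if c ≥ 3 then
        let p := c * x
        match st.2 with
        | none => (counts, some p)
        | some b => if p < b then (counts, some p) else (counts, some b)
      else (counts, st.2)) (d, m)).2
    = (BLcands d sticks).foldl minOpt m := by
  induction sticks generalizing d m with
  | nil => rfl
  | cons x xs ih =>
      simp only [List.foldl_cons, BLcands]
      by_cases h : d.getD x 0 + 1 ≥ 3
      · simp only [h, if_true, List.foldl_append, List.foldl_cons, List.foldl_nil]
        cases m with
        | none => exact ih _ _
        | some b =>
            by_cases hlt : (d.getD x 0 + 1) * x < b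
            · simp only [hlt, if_true]; rw [ih]; simp [minOpt, hlt]
            · simp only [hlt, if_false]; rw [ih]; simp [minOpt, hlt]
      · simp only [h, if_false, List.nil_append]
        exact ih _ _

theorem BLcands_append (xs : List Int) (x : Int) (d : PySem.Dict Int Int) :
    BLcands d (xs ++ [x])
    = BLcands d xs ++
      (if (xs.foldl (fun d x => d.insert x (d.getD x 0 + 1)) d).getD x 0 + 1 ≥ 3
       then [((xs.foldl (fun d x => d.insert x (d.getD x 0 + 1)) d).getD x 0 + 1) * x] else []) := by
  induction xs generalizing d with
  | nil => simp [BLcands]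
  | cons y ys ih =>
      simp only [List.cons_append, BLcands, List.foldl_cons, ih, List.append_assoc]

theorem flatMap_congr_mem {α β : Type} (l : List α) (f g : α → List β)
    (h : ∀ x ∈ l, f x = g x) : l.flatMap f = l.flatMap g := by
  induction l with
  | nil => rfl
  | cons x xs ih =>
      simp only [List.flatMap_cons, h x (by simp), ih (fun y hy => h y (by simp [hy]))]

theorem flatMap_extend_perm {α β : Type} (K : List α) (f g : α → List β) (x : α) (t : List β)
    (hx : x ∈ K) (hnd : K.Nodup)
    (hoff : ∀ k ∈ K, k ≠ x → g k = f k) (hat : g x = f x ++ t) :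
    (K.flatMap g).Perm (K.flatMap f ++ t) := by
  induction K with
  | nil => cases hx
  | cons k rest ih =>
      rcases List.mem_cons.mp hx with rfl | hxr
      · have hrest : rest.flatMap g = rest.flatMap f := by
          apply flatMap_congr_mem
          intro y hy
          exact hoff y (by simp [hy]) (fun hyx => (List.nodup_cons.mp hnd).1 (hyx ▸ hy))
        simp only [List.flatMap_cons, hat, hrest, List.append_assoc]
        refine List.Perm.append_left _ ?_
        exact List.perm_append_comm
      · by_cases hkx : k = x
        · subst hkx
          exact absurd hxr (List.nodup_cons.mp hnd).1
        · have := ih hxr (List.nodup_cons.mp hnd).2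
            (fun y hy hyx => hoff y (by simp [hy]) hyx)
          simp only [List.flatMap_cons, hoff k (by simp) hkx, List.append_assoc]
          exact List.Perm.append_left _ this

-- the candidate contributed by appending one more stick of length x
def newCand (xs : List Int) (x : Int) : List Int :=
  if (xs.count x : Int) + 1 ≥ 3 then [((xs.count x : Int) + 1) * x] else []

theorem ofList_append_singleton (xs : List Int) (x : Int) :
    PySem.Set.ofList (xs ++ [x])
    = if x ∈ xs then PySem.Set.ofList xs else PySem.Set.ofList xs ++ [x] := by
  rw [PySem.Set.ofList, List.foldl_append]
  simp only [List.foldl_cons, List.foldl_nil]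
  rw [show List.foldl PySem.Set.add PySem.Set.empty xs = PySem.Set.ofList xs from rfl]
  rw [PySem.Set.add]
  by_cases h : x ∈ xs <;> simp [PySem.Set.mem_ofList, h]

theorem AL_append (xs : List Int) (x : Int) :
    (ALcands (xs ++ [x])).Perm (ALcands xs ++ newCand xs x) := by
  have hcnt : ∀ k : Int, k ≠ x → (xs ++ [x]).count k = xs.count k := by
    intro k hk
    simp [List.count_append, Ne.symm hk]
  have hcx : (xs ++ [x]).count x = xs.count x + 1 := by simp
  unfold ALcands
  rw [ofList_append_singleton]
  by_cases hm : x ∈ xs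
  · simp only [hm, if_true]
    apply flatMap_extend_perm _ _ _ x _ ((PySem.Set.mem_ofList xs x).mpr hm)
      (PySem.Set.nodup_ofList xs)
    · intro k _ hkx
      rw [hcnt k hkx]
    · rw [hcx]
      push_cast
      unfold newCand
      by_cases h3 : (3 : Int) ≤ (xs.count x : Int) + 1
      · rw [show ((xs.count x : Int) + 1 + 1) = ((xs.count x : Int) + 1) + 1 from rfl,
            PySem.List.pyRange_one_succ_right h3]
        simp [h3, ge_iff_le]
      · rw [PySem.List.pyRange_one_eq_nil (by omega),
            PySem.List.pyRange_one_eq_nil (by omega)]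
        simp [h3, ge_iff_le]
  · simp only [hm, if_false]
    rw [List.flatMap_append]
    rw [flatMap_congr_mem _ _ (fun k => (PySem.List.pyRange 3 ((xs.count k : Int) + 1) 1).map
          (fun s => s * k))
        (fun k hk => by
          have hkx : k ≠ x := fun h => hm (h ▸ (PySem.Set.mem_ofList xs k).mp hk)
          rw [hcnt k hkx])]
    have h0 : xs.count x = 0 := List.count_eq_zero.mpr hm
    apply List.Perm.append_left
    simp only [List.flatMap_cons, List.flatMap_nil, List.append_nil]
    unfold newCand
    rw [hcx, h0]
    rw [PySem.List.pyRange_one_eq_nil (by norm_num)]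
    norm_num

theorem BL_perm_AL (sticks : List Int) :
    (BLcands PySem.Dict.empty sticks).Perm (ALcands sticks) := by
  induction sticks using List.reverseRecOn with
  | nil => rfl
  | append_singleton xs x ih =>
      rw [BLcands_append]
      rw [PySem.Dict.foldl_insert_getD_add_one_eq_counter, PySem.Dict.getD_counter]
      exact (ih.append_right _).trans (AL_append xs x).symm

theorem foldl_minOpt_perm {l₁ l₂ : List Int} (h : l₁.Perm l₂) (m : Option Int) :
    l₁.foldl minOpt m = l₂.foldl minOpt m := by
  exact h.foldl_eq' (fun x _ y _ z => (minOpt_leftComm z x y)) m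

-- ===== VERDICT (by name: the statement is the Claim_ definition above) =====
theorem find_min_polygon_spec : Claim_equal_find_min_polygon := by
  intro sticks _
  unfold Spec_find_min_polygon find_min_polygon find_min_polygon_alt
  simp only []
  rw [outer_eq, B_fold]
  have : (PySem.Dict.counter sticks).items.flatMap
      (fun lv => (PySem.List.pyRange 3 (lv.2 + 1) 1).map (fun s => s * lv.1)) = ALcands sticks := by
    rw [PySem.Dict.items_counter, List.flatMap_map]
    rfl
  rw [this, foldl_minOpt_perm (BL_perm_AL sticks) none]
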